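-- pv_equiv track=rewrite | github.com/zimbatm/home | packages/ask-local/agent.py | diff_cap
-- ===== SOURCE A (Python) =====
-- def diff_cap(diff: str, budget: int = 6000) -> str:
--     """Hunk-header-weighted truncation: keep all diff/---/+++/@@ lines, drop
--     context lines first, then change lines, until under budget. Diffs are
--     repetitive so lookup-decode acceptance should beat the intent-text bench."""
--     if len(diff) <= budget:
--         return diff
--     lines = diff.splitlines()
--     hdr = tuple(i for i, l in enumerate(lines)
--                 if l.startswith(("diff ", "+++", "---", "@@")))
--     keep = set(hdr)
--     size = sum(len(lines[i]) + 1 for i in keep)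
--     # changes before context: signal lives in +/-, not in surrounding ' ' lines
--     for pred in (lambda l: l[:1] in "+-", lambda l: True):
--         for i, l in enumerate(lines):
--             if size >= budget:
--                 break
--             if i not in keep and pred(l):
--                 keep.add(i)
--                 size += len(l) + 1
--     out = [lines[i] if i in keep else None for i in range(len(lines))]
--     folded, gap = [], False
--     for l in out:
--         if l is None:
--             if not gap:
--                 folded.append(" …")
--             gap = True
--         else:
--             folded.append(l)
--             gap = False
--     return "\n".join(folded)
-- ===== SOURCE B (Python) =====
-- def diff_cap(diff: str, budget: int = 6000) -> str:
--     """Closed-form threshold decomposition: one partition pass splits line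
--     indices into header/change/context lists; prefix sums of line sizes give
--     the number of change/context lines admitted under budget arithmetically
--     (no incremental kept-set greedy); output is rebuilt from the sorted kept
--     index list, emitting ' ...' wherever consecutive kept indices jump."""
--     if len(diff) <= budget:
--         return diff
--     lines = diff.splitlines()
--     hdr, chg, ctx = [], [], []
--     for i, l in enumerate(lines):
--         if l.startswith(("diff ", "+++", "---", "@@")):
--             hdr.append(i)
--         elif l[:1] in "+-":
--             chg.append(i)
--         else:
--             ctx.append(i)
--     base = sum(len(lines[i]) + 1 for i in hdr)
--
--     def threshold(idxs, start):
--         # cum[j] = size before admitting idxs[j]; strictly increasing, so the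
--         # number admitted is just the count of prefix sums below budget
--         cum = [start]
--         for i in idxs:
--             cum.append(cum[-1] + len(lines[i]) + 1)
--         t = sum(c < budget for c in cum[:-1])
--         return t, cum[t]
--
--     t1, s1 = threshold(chg, base)
--     t2, _ = threshold(ctx, s1)
--     kept = sorted(hdr + chg[:t1] + ctx[:t2])
--     out, prev = [], -1
--     for i in kept:
--         if i > prev + 1:
--             out.append(" …")
--         out.append(lines[i])
--         prev = i
--     if prev < len(lines) - 1:
--         out.append(" …")
--     return "\n".join(out)
-- ===== Notes on version B (the rewrite author's own statement) =====
-- stated objective: alternative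
-- what changed: Replaces A's stateful two-pass greedy over a growing kept-set with a closed-form computation: one partition pass splits indices into header/change/context lists, prefix sums of line sizes determine arithmetically how many change and context lines fit under budget, and the output is rebuilt from the sorted kept index list by gap detection instead of A's None-placeholder fold.
import Mathlib
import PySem

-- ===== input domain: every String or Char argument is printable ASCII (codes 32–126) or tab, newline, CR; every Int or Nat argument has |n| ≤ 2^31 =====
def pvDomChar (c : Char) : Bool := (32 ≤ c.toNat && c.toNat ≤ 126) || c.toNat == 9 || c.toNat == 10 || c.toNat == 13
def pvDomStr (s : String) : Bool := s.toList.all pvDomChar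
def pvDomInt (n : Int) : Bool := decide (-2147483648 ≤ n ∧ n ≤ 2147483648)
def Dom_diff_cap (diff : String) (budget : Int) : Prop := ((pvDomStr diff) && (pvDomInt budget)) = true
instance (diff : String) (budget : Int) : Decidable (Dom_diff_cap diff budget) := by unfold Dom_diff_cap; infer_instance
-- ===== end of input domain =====

-- B replaces A's stateful two-pass greedy over a growing kept-set by a closed-form
-- decomposition: one partition pass, prefix-sum thresholds for how many change/context
-- lines fit, and reconstruction from the sorted kept index list (alternative; same value).

-- shared transliterations of subexpressions both Pythons contain verbatim:
-- l.startswith(("diff ", "+++", "---", "@@"))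
def pvIsHdr (l : List Char) : Bool :=
  PySem.Chars.startswith l "diff ".toList || PySem.Chars.startswith l "+++".toList ||
    PySem.Chars.startswith l "---".toList || PySem.Chars.startswith l "@@".toList

-- l[:1] in "+-"
def pvIsChange (l : List Char) : Bool :=
  PySem.Chars.isIn (PySem.List.slice l none (some 1)) "+-".toList

-- ===== PORT A =====
-- inner 'for i, l in enumerate(lines): …' loop of A, with its break
def pvPassA (budget : Int) (pred : List Char → Bool) :
    List (Int × List Char) → PySem.Set Int → Int → PySem.Set Int × Int
  | [], keep, size => (keep, size)
  | (i, l) :: rest, keep, size =>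
    if size ≥ budget then (keep, size)
    else if !(PySem.Set.contains keep i) && pred l then
      pvPassA budget pred rest (PySem.Set.add keep i) (size + PySem.Chars.len l + 1)
    else pvPassA budget pred rest keep size

-- A's 'for l in out:' folding loop with its gap flag
def pvFoldA : List (Option (List Char)) → List (List Char) → Bool → List (List Char)
  | [], folded, _ => folded
  | none :: rest, folded, gap =>
      pvFoldA rest (if gap then folded else folded ++ [" …".toList]) true
  | some l :: rest, folded, _ => pvFoldA rest (folded ++ [l]) false

def diff_cap (diff : String) (budget : Int) : String :=
  if PySem.Str.len diff ≤ budget then diff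
  else
    let lines := PySem.Chars.splitlines diff.toList
    let hdr := ((PySem.List.enumerate lines).filter (fun q => pvIsHdr q.2)).map (·.1)
    let keep := PySem.Set.ofList hdr
    let size := (keep.map (fun i => PySem.Chars.len (PySem.List.pyGetD lines i []) + 1)).sum
    let st := [pvIsChange, fun _ => true].foldl
        (fun (s : PySem.Set Int × Int) pred =>
          pvPassA budget pred (PySem.List.enumerate lines) s.1 s.2)
        (keep, size)
    let out := (PySem.List.pyRange 0 (lines.length : Int) 1).map
        (fun i => if PySem.Set.contains st.1 i then some (PySem.List.pyGetD lines i []) else none)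
    String.ofList (PySem.Chars.join ['\n'] (pvFoldA out [] false))

-- ===== PORT B =====
-- B's partition loop: 'for i, l in enumerate(lines): …append(i)…' into hdr/chg/ctx
def pvPartB : List (Int × List Char) → List Int × List Int × List Int → List Int × List Int × List Int
  | [], acc => acc
  | (i, l) :: rest, (h, c, x) =>
    if pvIsHdr l then pvPartB rest (h ++ [i], c, x)
    else if pvIsChange l then pvPartB rest (h, c ++ [i], x)
    else pvPartB rest (h, c, x ++ [i])

-- B's 'cum = [start]; for i in idxs: cum.append(cum[-1] + len(lines[i]) + 1)'
def pvCumB (lines : List (List Char)) (idxs : List Int) (start : Int) : List Int :=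
  idxs.foldl
    (fun cum i =>
      cum ++ [PySem.List.pyGetD cum (-1) 0 + PySem.Chars.len (PySem.List.pyGetD lines i []) + 1])
    [start]

-- B's threshold helper: t = sum(c < budget for c in cum[:-1]); returns (t, cum[t])
def pvThresholdB (lines : List (List Char)) (budget : Int) (idxs : List Int) (start : Int) :
    Nat × Int :=
  let cum := pvCumB lines idxs start
  let t := (PySem.List.slice cum none (some (-1))).countP (fun c => c < budget)
  (t, PySem.List.pyGetD cum (t : Int) 0)

-- B's 'for i in kept: …' emission loop with its prev index
def pvEmitB (lines : List (List Char)) : List Int → List (List Char) → Int → List (List Char) × Int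
  | [], out, prev => (out, prev)
  | i :: rest, out, prev =>
    pvEmitB lines rest
      ((if i > prev + 1 then out ++ [" …".toList] else out) ++ [PySem.List.pyGetD lines i []]) i

-- B's trailing 'if prev < len(lines) - 1: out.append(" …")'
def pvFinish (lines : List (List Char)) (ep : List (List Char) × Int) : List (List Char) :=
  ep.1 ++ (if ep.2 < (lines.length : Int) - 1 then [" …".toList] else [])

def diff_cap_alt (diff : String) (budget : Int) : String :=
  if PySem.Str.len diff ≤ budget then diff
  else
    let lines := PySem.Chars.splitlines diff.toList
    let p := pvPartB (PySem.List.enumerate lines) ([], [], [])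
    let base := (p.1.map (fun i => PySem.Chars.len (PySem.List.pyGetD lines i []) + 1)).sum
    let th1 := pvThresholdB lines budget p.2.1 base
    let th2 := pvThresholdB lines budget p.2.2 th1.2
    let kept := PySem.List.sorted
        (p.1 ++ PySem.List.slice p.2.1 none (some (th1.1 : Int))
            ++ PySem.List.slice p.2.2 none (some (th2.1 : Int)))
        (fun i => i) false
    String.ofList (PySem.Chars.join ['\n'] (pvFinish lines (pvEmitB lines kept [] (-1))))

-- ===== PRECONDITION & SPEC =====
def Spec_diff_cap (diff : String) (budget : Int) (out : String) : Prop := out = diff_cap_alt diff budget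
instance (diff : String) (budget : Int) (out : String) : Decidable (Spec_diff_cap diff budget out) := by unfold Spec_diff_cap; infer_instance

-- ===== CLAIM (what is proved, stated in full; the proofs are below) =====
def Claim_equal_diff_cap : Prop := ∀ (diff : String) (budget : Int), Dom_diff_cap diff budget → Spec_diff_cap diff budget (diff_cap diff budget)

-- ===== LEMMAS AND PROOFS =====

-- proof-side set-greedy: A's pass restricted to the indices it actually admits
def pvGSet (budget : Int) (lines : List (List Char)) :
    List Int → PySem.Set Int × Int → PySem.Set Int × Int
  | [], s => s
  | i :: rest, s =>
    if s.2 ≥ budget then s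
    else pvGSet budget lines rest
      (PySem.Set.add s.1 i, s.2 + PySem.Chars.len (PySem.List.pyGetD lines i []) + 1)

theorem pvGSet_of_ge (budget : Int) (lines : List (List Char)) (l : List Int)
    (s : PySem.Set Int × Int) (h : s.2 ≥ budget) : pvGSet budget lines l s = s := by
  cases l with
  | nil => rfl
  | cons i rest => simp [pvGSet, h]

theorem pvContains_add_of_ne (s : PySem.Set Int) {x y : Int} (h : y ≠ x) :
    PySem.Set.contains (PySem.Set.add s x) y = PySem.Set.contains s y := by
  have h1 : (PySem.Set.contains (PySem.Set.add s x) y = true) ↔ (PySem.Set.contains s y = true) := by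
    rw [PySem.Set.contains_iff, PySem.Set.contains_iff, PySem.Set.mem_add]
    exact ⟨fun hm => hm.elim id (fun he => absurd he h), Or.inl⟩
  exact Bool.eq_iff_iff.mpr (by simpa using h1)

-- A's pass = set-greedy over the fixed filtered index list (keep grows only at
-- indices that occur once, so membership tests of later indices are unchanged)
theorem pvPassA_eq_gSet (budget : Int) (lines : List (List Char))
    (pred : List Char → Bool) (ps : List (Int × List Char)) (keep : PySem.Set Int) (size : Int)
    (hd : ps.Pairwise (fun a b => a.1 ≠ b.1))
    (hv : ∀ q ∈ ps, PySem.List.pyGetD lines q.1 [] = q.2) :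
    pvPassA budget pred ps keep size
      = pvGSet budget lines
          ((ps.filter (fun q => !(PySem.Set.contains keep q.1) && pred q.2)).map (·.1))
          (keep, size) := by
  induction ps generalizing keep size with
  | nil => rfl
  | cons q rest ih =>
    obtain ⟨i, l⟩ := q
    rw [List.pairwise_cons] at hd
    have hvi : PySem.List.pyGetD lines i [] = l := hv (i, l) (List.mem_cons_self ..)
    have hrest : ∀ q ∈ rest, PySem.List.pyGetD lines q.1 [] = q.2 :=
      fun q hq => hv q (List.mem_cons_of_mem _ hq)
    by_cases hb : size ≥ budget
    · simp only [pvPassA, if_pos hb]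
      rw [pvGSet_of_ge _ _ _ _ hb]
    · by_cases hc : (!(PySem.Set.contains keep i) && pred l) = true
      · have hfl : rest.filter (fun q => !(PySem.Set.contains (PySem.Set.add keep i) q.1) && pred q.2)
                 = rest.filter (fun q => !(PySem.Set.contains keep q.1) && pred q.2) := by
          apply List.filter_congr
          intro q hq
          rw [pvContains_add_of_ne _ (Ne.symm (hd.1 q hq))]
        simp only [pvPassA, if_neg hb, if_pos hc]
        simp only [List.filter_cons, hc, if_true, List.map_cons]
        simp only [pvGSet, if_neg hb]
        rw [ih _ _ hd.2 hrest, hfl, hvi]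
      · have hc' : (!(PySem.Set.contains keep i) && pred l) = false := by simpa using hc
        simp only [pvPassA, if_neg hb, if_neg hc]
        simp only [List.filter_cons, hc', Bool.false_eq_true, if_false]
        exact ih _ _ hd.2 hrest

-- cons-form of B's prefix-sum list
def pvCumC (lines : List (List Char)) : Int → List Int → List Int
  | s, [] => [s]
  | s, i :: rest => s :: pvCumC lines (s + PySem.Chars.len (PySem.List.pyGetD lines i []) + 1) rest

theorem pvCumC_ne_nil (lines : List (List Char)) (s : Int) (idxs : List Int) :
    pvCumC lines s idxs ≠ [] := by
  cases idxs <;> simp [pvCumC]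

theorem pvCumC_ge (lines : List (List Char)) (idxs : List Int) :
    ∀ (s : Int) (c : Int), c ∈ pvCumC lines s idxs → s ≤ c := by
  induction idxs with
  | nil => intro s c hc; simp [pvCumC] at hc; omega
  | cons i rest ih =>
    intro s c hc
    simp only [pvCumC, List.mem_cons] at hc
    rcases hc with rfl | hc
    · omega
    · have := ih _ _ hc
      have hlen : (0 : Int) ≤ PySem.Chars.len (PySem.List.pyGetD lines i []) := by
        rw [PySem.Chars.len_eq]; positivity
      omega

theorem pvCumB_eq_cumC (lines : List (List Char)) (idxs : List Int) (start : Int) :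
    pvCumB lines idxs start = pvCumC lines start idxs := by
  have key : ∀ (l : List Int) (pre : List Int) (c : Int),
      l.foldl (fun cum i =>
          cum ++ [PySem.List.pyGetD cum (-1) 0 + PySem.Chars.len (PySem.List.pyGetD lines i []) + 1])
        (pre ++ [c]) = pre ++ pvCumC lines c l := by
    intro l
    induction l with
    | nil => intro pre c; simp [pvCumC]
    | cons i rest ih =>
      intro pre c
      rw [List.foldl_cons, PySem.List.pyGetD_neg_one_append_singleton]
      have := ih (pre ++ [c]) (c + PySem.Chars.len (PySem.List.pyGetD lines i []) + 1)
      rw [List.append_assoc] at this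
      rw [← List.append_assoc] at this
      rw [this]
      simp [pvCumC]
  have := key idxs [] start
  simpa [pvCumB] using this

-- the greedy pass admits exactly the prefix cut out by the prefix-sum threshold
theorem pvGSet_eq_cut (budget : Int) (lines : List (List Char)) (idxs : List Int) :
    ∀ (K : PySem.Set Int) (s : Int),
      pvGSet budget lines idxs (K, s)
        = ((idxs.take ((pvCumC lines s idxs).dropLast.countP (fun c => c < budget))).foldl
             PySem.Set.add K,
           (pvCumC lines s idxs).getD
             ((pvCumC lines s idxs).dropLast.countP (fun c => c < budget)) 0) := by
  induction idxs with
  | nil => intro K s; simp [pvGSet, pvCumC]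
  | cons i rest ih =>
    intro K s
    have hne := pvCumC_ne_nil lines (s + PySem.Chars.len (PySem.List.pyGetD lines i []) + 1) rest
    rw [show pvCumC lines s (i :: rest)
          = s :: pvCumC lines (s + PySem.Chars.len (PySem.List.pyGetD lines i []) + 1) rest from rfl,
        List.dropLast_cons_of_ne_nil hne]
    by_cases hb : s ≥ budget
    · have hz : ((s :: (pvCumC lines (s + PySem.Chars.len (PySem.List.pyGetD lines i []) + 1) rest).dropLast).countP
          (fun c => c < budget)) = 0 := by
        rw [List.countP_eq_zero]
        intro c hc
        simp only [List.mem_cons] at hc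
        rcases hc with rfl | hc
        · simp; omega
        · have := pvCumC_ge lines rest _ _ (List.dropLast_subset _ hc)
          have hlen : (0 : Int) ≤ PySem.Chars.len (PySem.List.pyGetD lines i []) := by
            rw [PySem.Chars.len_eq]; positivity
          simp; omega
      rw [hz]
      simp [pvGSet, hb]
    · have hs : decide (s < budget) = true := by simp; omega
      rw [List.countP_cons_of_pos (by simpa using hs)]
      simp only [pvGSet, if_neg hb]
      rw [ih (PySem.Set.add K i) (s + PySem.Chars.len (PySem.List.pyGetD lines i []) + 1)]
      simp [List.take_succ_cons]

-- the threshold never admits past the list, and stops exactly at the budget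
theorem pvCut_spec (budget : Int) (lines : List (List Char)) (idxs : List Int) :
    ∀ (s : Int),
      (pvCumC lines s idxs).dropLast.countP (fun c => c < budget) ≤ idxs.length ∧
      ((pvCumC lines s idxs).dropLast.countP (fun c => c < budget) < idxs.length →
        ¬ ((pvCumC lines s idxs).getD
            ((pvCumC lines s idxs).dropLast.countP (fun c => c < budget)) 0 < budget)) := by
  induction idxs with
  | nil => intro s; simp [pvCumC]
  | cons i rest ih =>
    intro s
    have hne := pvCumC_ne_nil lines (s + PySem.Chars.len (PySem.List.pyGetD lines i []) + 1) rest
    rw [show pvCumC lines s (i :: rest)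
          = s :: pvCumC lines (s + PySem.Chars.len (PySem.List.pyGetD lines i []) + 1) rest from rfl,
        List.dropLast_cons_of_ne_nil hne]
    by_cases hb : s ≥ budget
    · have hz : ((s :: (pvCumC lines (s + PySem.Chars.len (PySem.List.pyGetD lines i []) + 1) rest).dropLast).countP
          (fun c => c < budget)) = 0 := by
        rw [List.countP_eq_zero]
        intro c hc
        simp only [List.mem_cons] at hc
        rcases hc with rfl | hc
        · simp; omega
        · have := pvCumC_ge lines rest _ _ (List.dropLast_subset _ hc)
          have hlen : (0 : Int) ≤ PySem.Chars.len (PySem.List.pyGetD lines i []) := by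
            rw [PySem.Chars.len_eq]; positivity
          simp; omega
      rw [hz]
      constructor
      · simp
      · intro _; simp; omega
    · have hs : decide (s < budget) = true := by simp; omega
      rw [List.countP_cons_of_pos (by simpa using hs)]
      obtain ⟨h1, h2⟩ := ih (s + PySem.Chars.len (PySem.List.pyGetD lines i []) + 1)
      constructor
      · simpa using h1
      · intro hlt
        rw [List.getD_cons_succ]
        simp only [List.length_cons] at hlt
        exact h2 (by omega)

-- B's partition pass computes the three filtered index lists
theorem pvPartB_spec (ps : List (Int × List Char)) :
    ∀ (h c x : List Int),
      pvPartB ps (h, c, x)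
        = (h ++ (ps.filter (fun q => pvIsHdr q.2)).map (·.1),
           c ++ (ps.filter (fun q => !pvIsHdr q.2 && pvIsChange q.2)).map (·.1),
           x ++ (ps.filter (fun q => !pvIsHdr q.2 && !pvIsChange q.2)).map (·.1)) := by
  induction ps with
  | nil => intro h c x; simp [pvPartB]
  | cons q rest ih =>
    intro h c x
    obtain ⟨i, l⟩ := q
    by_cases h1 : pvIsHdr l = true
    · simp [pvPartB, h1, ih]
    · by_cases h2 : pvIsChange l = true
      · simp [pvPartB, h1, h2, ih]
      · simp [pvPartB, h1, h2, ih]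

-- membership in a filtered index list of the enumeration
theorem pvMemMapFst (lines : List (List Char)) (P : Int × List Char → Bool)
    (j : Nat) (hj : j < lines.length) :
    ((j : Int) ∈ ((PySem.List.enumerate lines).filter P).map (·.1))
      ↔ P ((j : Int), lines[j]) = true := by
  simp only [List.mem_map, List.mem_filter, PySem.List.mem_enumerate_iff]
  constructor
  · rintro ⟨q, ⟨⟨k, hk, rfl⟩, hP⟩, hfst⟩
    simp only [zero_add] at hP hfst
    have : k = j := by exact_mod_cast hfst
    subst this
    exact hP
  · intro hP
    exact ⟨((j : Int), lines[j]), ⟨⟨j, hj, by simp⟩, hP⟩, rfl⟩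

theorem pvMemMapFstBounds (lines : List (List Char)) (P : Int × List Char → Bool) :
    ∀ i ∈ ((PySem.List.enumerate lines).filter P).map (·.1),
      0 ≤ i ∧ i < (lines.length : Int) := by
  intro i hi
  simp only [List.mem_map, List.mem_filter, PySem.List.mem_enumerate_iff] at hi
  obtain ⟨q, ⟨⟨k, hk, rfl⟩, _⟩, rfl⟩ := hi
  simp
  omega

theorem pvPairwiseMapFst (lines : List (List Char)) (P : Int × List Char → Bool) :
    (((PySem.List.enumerate lines).filter P).map (·.1)).Pairwise (· < ·) :=
  List.pairwise_map.mpr ((PySem.List.pairwise_lt_enumerate lines 0).filter P)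

-- both loops are inert once the position has passed the end of the lines
theorem pvRecon_stop (lines : List (List Char)) (S : PySem.Set Int) (ks : List Int)
    (p : Nat) (out : List (List Char)) (hn : lines.length ≤ p)
    (hbnd : ∀ i ∈ ks, (p : Int) ≤ i ∧ i < (lines.length : Int)) :
    (pvFoldA ((PySem.List.pyRange (p : Int) (lines.length : Int) 1).map
        (fun i => if PySem.Set.contains S i then some (PySem.List.pyGetD lines i []) else none))
      out false = pvFinish lines (pvEmitB lines ks out ((p : Int) - 1)))
    ∧ (pvFoldA ((PySem.List.pyRange (p : Int) (lines.length : Int) 1).map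
        (fun i => if PySem.Set.contains S i then some (PySem.List.pyGetD lines i []) else none))
      out true = pvFinish lines (pvEmitB lines ks out ((ks.headD (lines.length : Int)) - 1))) := by
  have hni : (lines.length : Int) ≤ (p : Int) := by exact_mod_cast hn
  have hks : ks = [] := by
    cases ks with
    | nil => rfl
    | cons a t =>
      exfalso
      have := hbnd a (List.mem_cons_self ..)
      omega
  subst hks
  rw [PySem.List.pyRange_one_eq_nil hni]
  simp only [List.map_nil, pvFoldA, pvEmitB, pvFinish, List.headD_nil]
  constructor
  · rw [if_neg (by omega)]
    simp
  · rw [if_neg (by omega)]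
    simp

-- A's gap-flag fold over the marked range equals B's emit loop over the kept list
theorem pvRecon (lines : List (List Char)) (S : PySem.Set Int) :
    ∀ (k : Nat) (ks : List Int) (p : Nat) (out : List (List Char)),
      lines.length ≤ p + k →
      ks.Pairwise (· < ·) →
      (∀ i ∈ ks, (p : Int) ≤ i ∧ i < (lines.length : Int)) →
      (∀ j : Nat, p ≤ j → j < lines.length →
        (PySem.Set.contains S (j : Int) = true ↔ (j : Int) ∈ ks)) →
      (pvFoldA ((PySem.List.pyRange (p : Int) (lines.length : Int) 1).map
          (fun i => if PySem.Set.contains S i then some (PySem.List.pyGetD lines i []) else none))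
        out false = pvFinish lines (pvEmitB lines ks out ((p : Int) - 1)))
      ∧ (pvFoldA ((PySem.List.pyRange (p : Int) (lines.length : Int) 1).map
          (fun i => if PySem.Set.contains S i then some (PySem.List.pyGetD lines i []) else none))
        out true = pvFinish lines (pvEmitB lines ks out ((ks.headD (lines.length : Int)) - 1))) := by
  intro k
  induction k with
  | zero =>
    intro ks p out hk hpw hbnd hmem
    exact pvRecon_stop lines S ks p out (by omega) hbnd
  | succ k ih =>
    intro ks p out hk hpw hbnd hmem
    by_cases hp : p < lines.length
    · have hpi : ((p : Int)) < (lines.length : Int) := by exact_mod_cast hp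
      have hcons : PySem.List.pyRange (p : Int) (lines.length : Int) 1
          = (p : Int) :: PySem.List.pyRange ((p + 1 : Nat) : Int) (lines.length : Int) 1 := by
        rw [PySem.List.pyRange_one_cons hpi]
        norm_num
      rw [hcons, List.map_cons]
      cases ks with
      | nil =>
        have hcp : PySem.Set.contains S (p : Int) = false := by
          have := hmem p le_rfl hp
          simp only [List.not_mem_nil, iff_false] at this
          exact Bool.eq_false_iff.mpr this
        have hbnd' : ∀ i ∈ ([] : List Int), ((p + 1 : Nat) : Int) ≤ i ∧ i < (lines.length : Int) := by
          simp
        have hmem' : ∀ j : Nat, p + 1 ≤ j → j < lines.length →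
            (PySem.Set.contains S (j : Int) = true ↔ (j : Int) ∈ ([] : List Int)) := by
          intro j h1 h2; exact hmem j (by omega) h2
        have ihp := ih [] (p + 1) (out ++ [" …".toList]) (by omega) (by simp) hbnd' hmem'
        have ihq := ih [] (p + 1) out (by omega) (by simp) hbnd' hmem'
        simp only [hcp, Bool.false_eq_true, if_false, pvFoldA, if_true]
        constructor
        · rw [ihp.2]
          simp only [pvEmitB, pvFinish, List.headD_nil]
          rw [if_neg (by omega), if_pos (by omega)]
          simp
        · rw [ihq.2]
      | cons i rest =>
        rw [List.pairwise_cons] at hpw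
        have hip : (p : Int) ≤ i := (hbnd i (List.mem_cons_self ..)).1
        by_cases hieq : i = (p : Int)
        · have hcp : PySem.Set.contains S (p : Int) = true := by
            rw [hmem p le_rfl hp]
            exact hieq ▸ List.mem_cons_self ..
          have hbnd' : ∀ j ∈ rest, ((p + 1 : Nat) : Int) ≤ j ∧ j < (lines.length : Int) := by
            intro j hj
            refine ⟨?_, (hbnd j (List.mem_cons_of_mem _ hj)).2⟩
            have := hpw.1 j hj
            push_cast; omega
          have hmem' : ∀ j : Nat, p + 1 ≤ j → j < lines.length →
              (PySem.Set.contains S (j : Int) = true ↔ (j : Int) ∈ rest) := by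
            intro j h1 h2
            rw [hmem j (by omega) h2, List.mem_cons]
            constructor
            · rintro (hji | hjr)
              · exfalso; rw [hieq] at hji; have : (j : Int) = (p : Int) := hji; omega
              · exact hjr
            · exact Or.inr
          have ihp := ih rest (p + 1) (out ++ [PySem.List.pyGetD lines (p : Int) []])
            (by omega) hpw.2 hbnd' hmem'
          simp only [hcp, if_true, pvFoldA]
          constructor
          · rw [ihp.1]
            simp only [pvEmitB]
            rw [if_neg (by omega), hieq]
            have : ((p + 1 : Nat) : Int) - 1 = (p : Int) := by push_cast; omega
            rw [this]
          · rw [ihp.1]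
            simp only [pvEmitB, List.headD_cons]
            rw [if_neg (by omega), hieq]
            have : ((p + 1 : Nat) : Int) - 1 = (p : Int) := by push_cast; omega
            rw [this]
        · have higt : (p : Int) < i := lt_of_le_of_ne hip (fun h => hieq h.symm)
          have hcp : PySem.Set.contains S (p : Int) = false := by
            apply Bool.eq_false_iff.mpr
            intro hc
            have := (hmem p le_rfl hp).mp hc
            rcases List.mem_cons.mp this with hji | hjr
            · exact hieq hji.symm
            · have := hpw.1 _ hjr; omega
          have hbnd' : ∀ j ∈ i :: rest, ((p + 1 : Nat) : Int) ≤ j ∧ j < (lines.length : Int) := by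
            intro j hj
            refine ⟨?_, (hbnd j hj).2⟩
            rcases List.mem_cons.mp hj with rfl | hjr
            · push_cast; omega
            · have := hpw.1 j hjr; push_cast; omega
          have hmem' : ∀ j : Nat, p + 1 ≤ j → j < lines.length →
              (PySem.Set.contains S (j : Int) = true ↔ (j : Int) ∈ i :: rest) := by
            intro j h1 h2; exact hmem j (by omega) h2
          have ihp := ih (i :: rest) (p + 1) (out ++ [" …".toList]) (by omega)
            (List.pairwise_cons.mpr hpw) hbnd' hmem'
          have ihq := ih (i :: rest) (p + 1) out (by omega)
            (List.pairwise_cons.mpr hpw) hbnd' hmem'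
          simp only [hcp, Bool.false_eq_true, if_false, pvFoldA, if_true]
          constructor
          · rw [ihp.2]
            simp only [pvEmitB, List.headD_cons]
            rw [if_neg (by omega), if_pos (by omega)]
          · rw [ihq.2]
    · exact pvRecon_stop lines S ks p out (by omega) hbnd

theorem pvMemMapFstElim (lines : List (List Char)) (P : Int × List Char → Bool) :
    ∀ a ∈ ((PySem.List.enumerate lines).filter P).map (·.1),
      ∃ (k : Nat) (_ : k < lines.length), a = (k : Int) ∧ P ((k : Int), lines[k]) = true := by
  intro a ha
  simp only [List.mem_map, List.mem_filter, PySem.List.mem_enumerate_iff] at ha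
  obtain ⟨q, ⟨⟨k, hk, rfl⟩, hP⟩, rfl⟩ := ha
  exact ⟨k, hk, by simp, by simpa using hP⟩

theorem pvMemFoldlAdd (l : List Int) (s : PySem.Set Int) (y : Int) :
    y ∈ l.foldl PySem.Set.add s ↔ y ∈ s ∨ y ∈ l := by
  simpa using PySem.Set.mem_foldl_add l id s y

theorem pvPassA_of_ge (budget : Int) (pred : List Char → Bool) (ps : List (Int × List Char))
    (keep : PySem.Set Int) (size : Int) (h : size ≥ budget) :
    pvPassA budget pred ps keep size = (keep, size) := by
  cases ps with
  | nil => rfl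
  | cons q rest => obtain ⟨i, l⟩ := q; simp [pvPassA, h]

-- final assembly: A's marked-range fold over the kept set equals B's emit walk
-- over the sorted kept index list
theorem pvFinal (lines : List (List Char)) (H Ct Xt : List Int)
    (hHp : H.Pairwise (· < ·)) (hCp : Ct.Pairwise (· < ·)) (hXp : Xt.Pairwise (· < ·))
    (hHb : ∀ a ∈ H, 0 ≤ a ∧ a < (lines.length : Int))
    (hCb : ∀ a ∈ Ct, 0 ≤ a ∧ a < (lines.length : Int))
    (hXb : ∀ a ∈ Xt, 0 ≤ a ∧ a < (lines.length : Int))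
    (hHC : ∀ a, ¬(a ∈ H ∧ a ∈ Ct)) (hHX : ∀ a, ¬(a ∈ H ∧ a ∈ Xt))
    (hCX : ∀ a, ¬(a ∈ Ct ∧ a ∈ Xt)) :
    pvFoldA ((PySem.List.pyRange 0 (lines.length : Int) 1).map
        (fun i => if PySem.Set.contains (Xt.foldl PySem.Set.add (Ct.foldl PySem.Set.add H)) i
                  then some (PySem.List.pyGetD lines i []) else none))
      [] false
    = pvFinish lines
        (pvEmitB lines (PySem.List.sorted (H ++ Ct ++ Xt) (fun i => i) false) [] (-1)) := by
  set S := Xt.foldl PySem.Set.add (Ct.foldl PySem.Set.add H) with hS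
  have hmemS : ∀ a : Int, (PySem.Set.contains S a = true) ↔ (a ∈ H ∨ a ∈ Ct ∨ a ∈ Xt) := by
    intro a
    rw [PySem.Set.contains_iff, hS, pvMemFoldlAdd, pvMemFoldlAdd]
    tauto
  have hRp : (PySem.List.pyRange 0 (lines.length : Int) 1).Pairwise (· < ·) := by
    have h1 : ((PySem.List.enumerate lines 0).map (·.1)).Pairwise (· < ·) :=
      List.pairwise_map.mpr (PySem.List.pairwise_lt_enumerate lines 0)
    rw [PySem.List.map_fst_enumerate, zero_add] at h1
    exact h1
  set ks := (PySem.List.pyRange 0 (lines.length : Int) 1).filter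
      (fun a => PySem.Set.contains S a) with hks
  have hksPair : ks.Pairwise (· < ·) := hRp.filter _
  have hksb : ∀ i ∈ ks, (0 : Int) ≤ i ∧ i < (lines.length : Int) := by
    intro i hi
    exact PySem.List.mem_pyRange_one.mp (List.mem_filter.mp hi).1
  have hksm : ∀ a : Int, a ∈ ks ↔ (a ∈ H ∨ a ∈ Ct ∨ a ∈ Xt) := by
    intro a
    rw [hks, List.mem_filter, PySem.List.mem_pyRange_one]
    constructor
    · rintro ⟨_, hc⟩; exact (hmemS a).mp hc
    · intro hm
      refine ⟨?_, (hmemS a).mpr hm⟩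
      rcases hm with h | h | h
      · exact hHb a h
      · exact hCb a h
      · exact hXb a h
  have hsort : PySem.List.sorted (H ++ Ct ++ Xt) (fun i => i) false = ks := by
    apply PySem.List.sorted_id_eq_of_perm_of_pairwise
    · have hnodcat : (H ++ Ct ++ Xt).Nodup := by
        rw [List.nodup_append, List.nodup_append]
        refine ⟨⟨hHp.imp ne_of_lt, hCp.imp ne_of_lt, ?_⟩, hXp.imp ne_of_lt, ?_⟩
        · intro a ha b hb h; subst h; exact hHC a ⟨ha, hb⟩
        · intro a ha b hb h; subst h
          rcases List.mem_append.mp ha with h' | h'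
          · exact hHX a ⟨h', hb⟩
          · exact hCX a ⟨h', hb⟩
      refine (List.perm_ext_iff_of_nodup (hksPair.imp ne_of_lt) hnodcat).mpr ?_
      intro a
      rw [hksm a]
      simp only [List.mem_append]
      tauto
    · exact hksPair.imp le_of_lt
  rw [hsort]
  have hrec := (pvRecon lines S lines.length ks 0 [] (by omega) hksPair
    (by intro i hi; simpa using hksb i hi)
    (by intro j _ hj
        rw [hmemS, ← hksm])).1
  simp only [Nat.cast_zero] at hrec
  rw [show ((0 : Int) - 1) = (-1 : Int) by norm_num] at hrec
  exact hrec

-- ===== VERDICT (by name: the statement is the Claim_ definition above) =====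
theorem diff_cap_spec : Claim_equal_diff_cap := by
  intro diff budget _
  unfold Spec_diff_cap diff_cap diff_cap_alt
  by_cases h0 : PySem.Str.len diff ≤ budget
  · rw [if_pos h0, if_pos h0]
  · rw [if_neg h0, if_neg h0]
    dsimp only
    set lines := PySem.Chars.splitlines diff.toList with hlines
    set enumL := PySem.List.enumerate lines with henumL
    rw [pvPartB_spec enumL [] []]
    dsimp only
    simp only [List.nil_append]
    set H := (enumL.filter (fun q => pvIsHdr q.2)).map (·.1) with hHdef
    set C := (enumL.filter (fun q => !pvIsHdr q.2 && pvIsChange q.2)).map (·.1) with hCdef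
    set X := (enumL.filter (fun q => !pvIsHdr q.2 && !pvIsChange q.2)).map (·.1) with hXdef
    -- enumeration facts
    have hdE : enumL.Pairwise (fun a b => a.1 ≠ b.1) := by
      rw [henumL]
      exact (PySem.List.pairwise_lt_enumerate lines 0).imp ne_of_lt
    have hvE : ∀ q ∈ enumL, PySem.List.pyGetD lines q.1 [] = q.2 := by
      intro q hq
      rw [henumL] at hq
      obtain ⟨k, hk, rfl⟩ := (PySem.List.mem_enumerate_iff lines 0 q).mp hq
      simp [PySem.List.pyGetD_natCast, List.getD_eq_getElem?_getD, List.getElem?_eq_getElem hk]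
    have hHp : H.Pairwise (· < ·) := by rw [hHdef, henumL]; exact pvPairwiseMapFst ..
    have hCp : C.Pairwise (· < ·) := by rw [hCdef, henumL]; exact pvPairwiseMapFst ..
    have hXp : X.Pairwise (· < ·) := by rw [hXdef, henumL]; exact pvPairwiseMapFst ..
    have hHb : ∀ a ∈ H, 0 ≤ a ∧ a < (lines.length : Int) := by
      rw [hHdef, henumL]; exact pvMemMapFstBounds lines _
    have hCb : ∀ a ∈ C, 0 ≤ a ∧ a < (lines.length : Int) := by
      rw [hCdef, henumL]; exact pvMemMapFstBounds lines _
    have hXb : ∀ a ∈ X, 0 ≤ a ∧ a < (lines.length : Int) := by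
      rw [hXdef, henumL]; exact pvMemMapFstBounds lines _
    -- mutual exclusion of the three index lists
    have hHC : ∀ a, ¬(a ∈ H ∧ a ∈ C) := by
      rintro a ⟨h1, h2⟩
      rw [hHdef, henumL] at h1; rw [hCdef, henumL] at h2
      obtain ⟨k1, hk1, rfl, hP1⟩ := pvMemMapFstElim lines _ _ h1
      obtain ⟨k2, hk2, he, hP2⟩ := pvMemMapFstElim lines _ _ h2
      have hkk : k1 = k2 := by exact_mod_cast he
      subst hkk
      simp only at hP1 hP2
      rw [hP1] at hP2
      simp at hP2
    have hHX : ∀ a, ¬(a ∈ H ∧ a ∈ X) := by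
      rintro a ⟨h1, h2⟩
      rw [hHdef, henumL] at h1; rw [hXdef, henumL] at h2
      obtain ⟨k1, hk1, rfl, hP1⟩ := pvMemMapFstElim lines _ _ h1
      obtain ⟨k2, hk2, he, hP2⟩ := pvMemMapFstElim lines _ _ h2
      have hkk : k1 = k2 := by exact_mod_cast he
      subst hkk
      simp only at hP1 hP2
      rw [hP1] at hP2
      simp at hP2
    have hCX : ∀ a, ¬(a ∈ C ∧ a ∈ X) := by
      rintro a ⟨h1, h2⟩
      rw [hCdef, henumL] at h1; rw [hXdef, henumL] at h2
      obtain ⟨k1, hk1, rfl, hP1⟩ := pvMemMapFstElim lines _ _ h1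
      obtain ⟨k2, hk2, he, hP2⟩ := pvMemMapFstElim lines _ _ h2
      have hkk : k1 = k2 := by exact_mod_cast he
      subst hkk
      simp only [Bool.and_eq_true, Bool.not_eq_eq_eq_not, Bool.not_true] at hP1 hP2
      rw [hP2.2] at hP1
      simp at hP1
    -- A's header set is the plain header index list
    have hkeq : PySem.Set.ofList H = H :=
      PySem.Set.ofList_eq_self_of_nodup _ (hHp.imp ne_of_lt)
    rw [hkeq]
    set base := (H.map (fun i => PySem.Chars.len (PySem.List.pyGetD lines i []) + 1)).sum
      with hbase
    -- A's membership test against the header set is the header predicate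
    have hcontH : ∀ q ∈ enumL, PySem.Set.contains H q.1 = pvIsHdr q.2 := by
      intro q hq
      rw [henumL] at hq
      obtain ⟨k, hk, rfl⟩ := (PySem.List.mem_enumerate_iff lines 0 q).mp hq
      simp only [zero_add]
      apply Bool.eq_iff_iff.mpr
      rw [PySem.Set.contains_iff, hHdef, henumL]
      simpa using pvMemMapFst lines (fun q => pvIsHdr q.2) k hk
    -- B side: unfold the thresholds into the cons-form prefix sums
    simp only [pvThresholdB]
    simp only [pvCumB_eq_cumC, PySem.List.slice_to_neg_one, PySem.List.pyGetD_natCast,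
      PySem.List.slice_to_natCast]
    -- A's first pass = prefix cut of the change list
    simp only [List.foldl_cons, List.foldl_nil]
    have hfC : enumL.filter (fun q => !(PySem.Set.contains H q.1) && pvIsChange q.2)
        = enumL.filter (fun q => !pvIsHdr q.2 && pvIsChange q.2) :=
      List.filter_congr (fun q hq => by rw [hcontH q hq])
    simp only [pvPassA_eq_gSet budget lines pvIsChange enumL H base hdE hvE]
    simp only [hfC]
    simp only [← hCdef]
    simp only [pvGSet_eq_cut budget lines C H base]
    set t1 := (pvCumC lines base C).dropLast.countP (fun c => c < budget) with ht1def
    set sz1 := (pvCumC lines base C).getD t1 0 with hsz1def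
    set K1 := (C.take t1).foldl PySem.Set.add H with hK1def
    set t2 := (pvCumC lines sz1 X).dropLast.countP (fun c => c < budget) with ht2def
    by_cases hb : sz1 ≥ budget
    · -- budget already reached: A's second pass is inert, B admits 0 context lines
      simp only [pvPassA_of_ge budget (fun _ => true) enumL K1 sz1 hb]
      have ht2zero : t2 = 0 := by
        rw [ht2def, List.countP_eq_zero]
        intro c hc
        have := pvCumC_ge lines X sz1 c (List.dropLast_subset _ hc)
        simp
        omega
      rw [ht2zero, List.take_zero]
      exact congrArg (fun l => String.ofList (PySem.Chars.join ['\n'] l))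
        (pvFinal lines H (C.take t1) []
          hHp (hCp.sublist (List.take_sublist ..)) (by simp)
          hHb (fun a ha => hCb a (List.take_subset _ _ ha)) (by simp)
          (fun a ⟨h1, h2⟩ => hHC a ⟨h1, List.take_subset _ _ h2⟩)
          (by simp) (by simp))
    · -- budget not reached: the whole change list was admitted, the second pass
      -- scans exactly the context lines
      have hcut := pvCut_spec budget lines C base
      rw [← ht1def] at hcut
      rw [← hsz1def] at hcut
      have ht1len : t1 = C.length := by
        rcases Nat.lt_or_ge t1 C.length with h | h
        · exact absurd (by omega : sz1 < budget) (hcut.2 h)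
        · have h1 := hcut.1; omega
      have hcontK : ∀ q ∈ enumL,
          PySem.Set.contains K1 q.1 = (pvIsHdr q.2 || pvIsChange q.2) := by
        intro q hq
        have hc1 := hcontH q hq
        rw [henumL] at hq
        obtain ⟨k, hk, rfl⟩ := (PySem.List.mem_enumerate_iff lines 0 q).mp hq
        simp only [zero_add] at hc1 ⊢
        apply Bool.eq_iff_iff.mpr
        rw [PySem.Set.contains_iff, hK1def, ht1len, List.take_length, pvMemFoldlAdd]
        have hmH : ((k : Int) ∈ H) ↔ pvIsHdr lines[k] = true := by
          rw [← PySem.Set.contains_iff, hc1]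
        have hmC : ((k : Int) ∈ C) ↔ (!pvIsHdr lines[k] && pvIsChange lines[k]) = true := by
          rw [hCdef, henumL]
          simpa using pvMemMapFst lines (fun q => !pvIsHdr q.2 && pvIsChange q.2) k hk
        rw [hmH, hmC]
        cases hx : pvIsHdr lines[k] <;> cases hy : pvIsChange lines[k] <;> simp
      have hfX : enumL.filter (fun q => !(PySem.Set.contains K1 q.1) && true)
          = enumL.filter (fun q => !pvIsHdr q.2 && !pvIsChange q.2) :=
        List.filter_congr (fun q hq => by rw [hcontK q hq]; simp [Bool.not_or])
      simp only [pvPassA_eq_gSet budget lines (fun _ => true) enumL K1 sz1 hdE hvE]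
      simp only [hfX]
      simp only [← hXdef]
      simp only [pvGSet_eq_cut budget lines X K1 sz1]
      exact congrArg (fun l => String.ofList (PySem.Chars.join ['\n'] l))
        (pvFinal lines H (C.take t1) (X.take t2)
          hHp (hCp.sublist (List.take_sublist ..)) (hXp.sublist (List.take_sublist ..))
          hHb (fun a ha => hCb a (List.take_subset _ _ ha))
          (fun a ha => hXb a (List.take_subset _ _ ha))
          (fun a ⟨h1, h2⟩ => hHC a ⟨h1, List.take_subset _ _ h2⟩)
          (fun a ⟨h1, h2⟩ => hHX a ⟨h1, List.take_subset _ _ h2⟩)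
          (fun a ⟨h1, h2⟩ => hCX a ⟨List.take_subset _ _ h1, List.take_subset _ _ h2⟩))
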